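-- pv_equiv track=rewrite | github.com/sblumenf/podcastknowledge | seeding_pipeline/src/processing/episode_flow.py | _create_development_timeline
-- ===== SOURCE A (Python) =====
-- from typing import List, Dict, Any, Optional, Tuple
--
-- def _create_development_timeline(phases: List[Dict]) -> List[str]:
--     """Create a simplified development timeline."""
--     if not phases:
--         return []
--
--     timeline = []
--     for phase in phases:
--         phase_name = phase["phase"]
--         if not timeline or timeline[-1] != phase_name:
--             timeline.append(phase_name)
--
--     return timeline
-- ===== SOURCE B (Python) =====
-- from typing import List, Dict
--
-- def _create_development_timeline(phases: List[Dict]) -> List[str]: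
--     """Create a simplified development timeline."""
--     names = [p["phase"] for p in phases]
--
--     def run_heads(ns):
--         # emit the first name of each run, then skip the whole run
--         if not ns:
--             return []
--         head = ns[0]
--         i = 1
--         while i < len(ns) and ns[i] == head:
--             i += 1
--         return [head] + run_heads(ns[i:])
--
--     return run_heads(names)
-- ===== Notes on version B (the rewrite author's own statement) =====
-- stated objective: alternative
-- what changed: Two staged passes instead of one accumulator loop: first extract all phase names, then a recursion that emits the head of each run of equal names and skips past the run, rather than comparing each name with timeline[-1].
import Mathlib
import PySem

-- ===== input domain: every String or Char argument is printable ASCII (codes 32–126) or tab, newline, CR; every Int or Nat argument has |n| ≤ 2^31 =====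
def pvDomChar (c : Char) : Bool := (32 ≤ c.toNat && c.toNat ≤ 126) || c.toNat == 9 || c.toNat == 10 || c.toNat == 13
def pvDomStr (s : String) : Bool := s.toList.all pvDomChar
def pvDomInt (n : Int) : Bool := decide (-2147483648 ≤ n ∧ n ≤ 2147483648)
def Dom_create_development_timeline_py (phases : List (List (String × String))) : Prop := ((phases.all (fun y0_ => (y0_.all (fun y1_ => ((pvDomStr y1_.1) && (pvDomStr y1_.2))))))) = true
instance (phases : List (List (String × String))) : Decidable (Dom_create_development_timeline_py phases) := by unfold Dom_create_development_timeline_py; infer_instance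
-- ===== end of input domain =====

-- B replaces A's single accumulator loop (compare with timeline[-1]) by two stages:
-- extract all phase names, then recursively emit the head of each run and skip the run.

-- ===== PORT A =====
-- phase["phase"]: Python dict lookup; none = KeyError (excluded by Pre_)
def pvLookupA (phase : List (String × String)) : Option String :=
  (PySem.Dict.mk phase).get? "phase"

-- one loop step of A: append phase_name when timeline is empty or its last element differs
def pvStepA (timeline : List String) (phase : List (String × String)) : Option (List String) :=
  match pvLookupA phase with
  | none => none
  | some phase_name =>
      some (if timeline = [] ∨ timeline.getLast? ≠ some phase_name
            then timeline ++ [phase_name] else timeline)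

def pvLoopA : List String → List (List (String × String)) → Option (List String)
  | timeline, [] => some timeline
  | timeline, p :: ps =>
      match pvStepA timeline p with
      | none => none          -- KeyError: unreachable under Pre_
      | some timeline' => pvLoopA timeline' ps

def create_development_timeline_py (phases : List (List (String × String))) : List String :=
  if phases = [] then []
  else (pvLoopA [] phases).getD []

-- ===== PORT B =====
-- run_heads: emit the first name of each run of equal names, skip past the run, recurse.
def pvRunHeads : List String → List String
  | [] => []
  | x :: xs => x :: pvRunHeads (xs.dropWhile (· == x))
  termination_by l => l.length
  decreasing_by exact Nat.lt_succ_of_le (List.length_dropWhile_le _ _)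

def create_development_timeline_py_alt (phases : List (List (String × String))) : List String :=
  match phases.mapM (fun p => (PySem.Dict.mk p).get? "phase") with
  | none => []               -- KeyError: unreachable under Pre_
  | some names => pvRunHeads names

-- ===== PRECONDITION & SPEC =====
-- A raises KeyError when some element lacks the key "phase"; exactly those inputs are excluded.
def Pre_create_development_timeline_py (phases : List (List (String × String))) : Prop :=
  ∀ p ∈ phases, (p.any (fun kv => kv.1 == "phase")) = true
instance (phases : List (List (String × String))) : Decidable (Pre_create_development_timeline_py phases) := by unfold Pre_create_development_timeline_py; infer_instance

def pvWitness_create_development_timeline_py : (List (List (String × String))) :=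
  [[("phase", "intro")], [("phase", "intro")], [("phase", "deep")]]

def Spec_create_development_timeline_py (phases : List (List (String × String))) (out : List String) : Prop := out = create_development_timeline_py_alt phases
instance (phases : List (List (String × String))) (out : List String) : Decidable (Spec_create_development_timeline_py phases out) := by unfold Spec_create_development_timeline_py; infer_instance

-- ===== CLAIM (what is proved, stated in full; the proofs are below) =====
def Claim_equal_create_development_timeline_py : Prop := ∀ (phases : List (List (String × String))), Dom_create_development_timeline_py phases → Pre_create_development_timeline_py phases → Spec_create_development_timeline_py phases (create_development_timeline_py phases)

-- ===== LEMMAS AND PROOFS =====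

-- equation lemmas for the well-founded pvRunHeads
lemma pvRunHeads_nil : pvRunHeads [] = [] := by rw [pvRunHeads.eq_def]

lemma pvRunHeads_cons (x : String) (xs : List String) :
    pvRunHeads (x :: xs) = x :: pvRunHeads (xs.dropWhile (· == x)) := by
  rw [pvRunHeads.eq_def]

-- Pre_ gives a successful lookup on every element
lemma pvLookupA_isSome (p : List (String × String))
    (h : (p.any (fun kv => kv.1 == "phase")) = true) : (pvLookupA p).isSome := by
  induction p with
  | nil => simp at h
  | cons kv rest ih =>
      obtain ⟨k, v⟩ := kv
      simp only [List.any_cons, Bool.or_eq_true] at h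
      simp only [pvLookupA, PySem.Dict.get?_mk_cons] at *
      by_cases hk : (k == "phase") = true
      · simp [hk]
      · rw [if_neg hk]
        exact ih (h.resolve_left hk)

-- A's fold on the extracted names, once the lookups are known to succeed
def pvFoldNames (timeline : List String) : List String → List String
  | [] => timeline
  | n :: ns =>
      pvFoldNames (if timeline = [] ∨ timeline.getLast? ≠ some n
                   then timeline ++ [n] else timeline) ns

lemma pvLoopA_eq_foldNames (ps : List (List (String × String))) (ns : List String)
    (tl : List String)
    (h : ps.mapM (fun p => (PySem.Dict.mk p).get? "phase") = some ns) :
    pvLoopA tl ps = some (pvFoldNames tl ns) := by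
  induction ps generalizing ns tl with
  | nil =>
      simp only [List.mapM_nil, Option.pure_def, Option.some.injEq] at h
      subst h; rfl
  | cons p ps ih =>
      rw [List.mapM_cons] at h
      simp only [Option.pure_def, Option.bind_eq_bind, Option.bind_eq_some_iff,
        Option.some.injEq] at h
      obtain ⟨n, hp, ns', hns', rfl⟩ := h
      simp only [pvLoopA, pvStepA, pvLookupA, hp]
      rw [ih ns' _ hns']
      rfl

-- the main invariant: A's fold from a nonempty timeline ending in x equals
-- that timeline followed by the run heads of the names with leading x's dropped
lemma pvFold_inv (ns : List String) (tl : List String) (x : String) :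
    pvFoldNames (tl ++ [x]) ns = (tl ++ [x]) ++ pvRunHeads (ns.dropWhile (· == x)) := by
  induction ns generalizing tl x with
  | nil => simp [pvFoldNames, pvRunHeads_nil]
  | cons n ns ih =>
      by_cases hn : n = x
      · subst hn
        have hdw : (n :: ns).dropWhile (· == n) = ns.dropWhile (· == n) := by
          simp
        have hlast : (tl ++ [n]).getLast? = some n := by simp
        rw [hdw]
        simp only [pvFoldNames]
        rw [if_neg (by simp [hlast])]
        exact ih tl n
      · have hne : (n == x) = false := by simp [hn]
        have hdw : (n :: ns).dropWhile (· == x) = n :: ns := by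
          simp [hne]
        rw [hdw, pvRunHeads_cons]
        have hlast : (tl ++ [x]).getLast? = some x := by simp
        simp only [pvFoldNames]
        rw [if_pos (Or.inr (by rw [hlast]; exact fun h => hn (Option.some.inj h).symm))]
        rw [show tl ++ [x] ++ [n] = (tl ++ [x]) ++ [n] from rfl]
        rw [ih (tl ++ [x]) n]
        simp

lemma pvFold_nil_eq_runHeads (ns : List String) :
    pvFoldNames [] ns = pvRunHeads ns := by
  cases ns with
  | nil => rw [pvRunHeads_nil]; rfl
  | cons n ns =>
      simp only [pvFoldNames, List.nil_append, pvRunHeads_cons]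
      have := pvFold_inv ns [] n
      simpa using this

lemma pvMapM_isSome (ps : List (List (String × String)))
    (h : ∀ p ∈ ps, (p.any (fun kv => kv.1 == "phase")) = true) :
    ∃ ns, ps.mapM (fun p => (PySem.Dict.mk p).get? "phase") = some ns := by
  induction ps with
  | nil => exact ⟨[], rfl⟩
  | cons p ps ih =>
      have h1 := pvLookupA_isSome p (h p (by simp))
      obtain ⟨n, hn⟩ := Option.isSome_iff_exists.mp h1
      obtain ⟨ns, hns⟩ := ih (fun q hq => h q (by simp [hq]))
      refine ⟨n :: ns, ?_⟩
      rw [List.mapM_cons]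
      simp only [Option.pure_def, Option.bind_eq_bind, Option.bind_eq_some_iff,
        Option.some.injEq]
      exact ⟨n, hn, ns, hns, rfl⟩

-- ===== VERDICT (by name: the statement is the Claim_ definition above) =====
theorem create_development_timeline_py_spec : Claim_equal_create_development_timeline_py := by
  intro phases _hdom hpre
  unfold Spec_create_development_timeline_py
  unfold create_development_timeline_py create_development_timeline_py_alt
  obtain ⟨ns, hm⟩ := pvMapM_isSome phases hpre
  rw [hm, pvLoopA_eq_foldNames phases ns [] hm]
  cases phases with
  | nil =>
      simp only [List.mapM_nil, Option.pure_def, Option.some.injEq] at hm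
      subst hm
      simp [pvRunHeads_nil]
  | cons p ps =>
      rw [if_neg (by simp)]
      simp [pvFold_nil_eq_runHeads]
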